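-- pv_equiv track=rewrite | github.com/JuanIgnacioOchoa/Practice_Algorythms | Google/Kickstart2021/Round_B/Increase Substrings/main.py | increase_subs
-- ===== SOURCE A (Python) =====
-- def increase_subs(S, N):
--     ans = []
--     res = 0
--     prev = -1
--     for s in S:
--         if prev == -1 or prev >= s:
--             res = 1
--         else:
--             res+=1
--         prev = s
--         ans.append(str(res))
--     return " ".join(ans)
-- ===== SOURCE B (Python) =====
-- def increase_subs(S, N):
--     nums = []
--     i = 0
--     n = len(S)
--     while i < n:
--         j = i + 1
--         while j < n and S[j - 1] < S[j]:
--             j += 1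
--         nums.extend(range(1, j - i + 1))
--         i = j
--     return " ".join(map(str, nums))
-- ===== Notes on version B (the rewrite author's own statement) =====
-- stated objective: alternative
-- what changed: B first finds each maximal strictly-increasing run (inner scan for its end), then emits the sequence 1..runlength per run, instead of A's single loop with a running counter reset on non-increase.
import Mathlib
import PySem

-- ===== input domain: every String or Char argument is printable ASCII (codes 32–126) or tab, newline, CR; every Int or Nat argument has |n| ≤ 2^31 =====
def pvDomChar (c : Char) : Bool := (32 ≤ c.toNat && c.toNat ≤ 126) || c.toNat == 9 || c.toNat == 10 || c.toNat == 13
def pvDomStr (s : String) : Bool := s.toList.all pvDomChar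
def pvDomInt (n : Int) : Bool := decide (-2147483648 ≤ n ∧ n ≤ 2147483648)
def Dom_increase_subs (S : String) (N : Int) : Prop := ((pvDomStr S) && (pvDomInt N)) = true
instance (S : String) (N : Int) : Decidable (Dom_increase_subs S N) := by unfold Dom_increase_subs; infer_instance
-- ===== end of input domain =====

-- B numbers each maximal strictly-increasing run 1..k in a two-pass run-segmentation instead of A's
-- running counter reset on non-increase; objective: alternative decomposition, same O(n) cost.

-- ===== PORT A =====
-- prev = -1 is modelled as `none` (it is only ever compared by the `prev == -1` test,
-- which Python short-circuits before `prev >= s`, so no int/str comparison happens).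
def increase_subs (S : String) (N : Int) : String :=
  let st := S.toList.foldl
    (fun (st : List String × Int × Option Char) s =>
      let ans := st.1; let res := st.2.1; let prev := st.2.2
      let res := match prev with
        | none => 1
        | some p => if p ≥ s then 1 else res + 1
      (ans ++ [PySem.Int.toStr res], res, some s))
    ([], 0, none)
  PySem.Str.join " " st.1

-- ===== PORT B =====
-- inner `while j < n and S[j-1] < S[j]` : length of the strictly-increasing chain after the run's head
def pvRunLen : Char → List Char → Nat
  | _, [] => 0
  | p, c :: cs => if p < c then 1 + pvRunLen c cs else 0

-- outer `while i < n` loop: one step per maximal run, emitting 1..(j-i) for that run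
def pvSegs : List Char → List Int
  | [] => []
  | c :: cs =>
      let k := pvRunLen c cs
      (List.range (k + 1)).map (fun i : Nat => (i : Int) + 1) ++ pvSegs (cs.drop k)
termination_by cs => cs.length
decreasing_by
  have := List.length_drop (l := cs) (i := pvRunLen c cs)
  simp_all

def increase_subs_alt (S : String) (N : Int) : String :=
  PySem.Str.join " " ((pvSegs S.toList).map PySem.Int.toStr)

-- ===== PRECONDITION & SPEC =====
def Spec_increase_subs (S : String) (N : Int) (out : String) : Prop := out = increase_subs_alt S N
instance (S : String) (N : Int) (out : String) : Decidable (Spec_increase_subs S N out) := by unfold Spec_increase_subs; infer_instance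

-- ===== CLAIM (what is proved, stated in full; the proofs are below) =====
def Claim_equal_increase_subs : Prop := ∀ (S : String) (N : Int), Dom_increase_subs S N → Spec_increase_subs S N (increase_subs S N)

-- ===== LEMMAS AND PROOFS =====

-- A's per-character emitted numbers, as a direct recursion (bridge target for the foldl)
def pvANums : Option Char → Int → List Char → List Int
  | _, _, [] => []
  | prev, res, s :: cs =>
      let r := match prev with
        | none => 1
        | some p => if p ≥ s then 1 else res + 1
      r :: pvANums (some s) r cs

theorem pvFoldl_bridge (cs : List Char) : ∀ (ans : List String) (res : Int) (prev : Option Char),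
    (cs.foldl
      (fun (st : List String × Int × Option Char) s =>
        let ans := st.1; let res := st.2.1; let prev := st.2.2
        let res := match prev with
          | none => 1
          | some p => if p ≥ s then 1 else res + 1
        (ans ++ [PySem.Int.toStr res], res, some s))
      (ans, res, prev)).1 = ans ++ (pvANums prev res cs).map PySem.Int.toStr := by
  induction cs with
  | nil => intro ans res prev; simp [pvANums]
  | cons s cs ih =>
      intro ans res prev
      simp only [List.foldl_cons, pvANums, List.map_cons]
      rw [ih]
      simp

theorem pvRange_succ_shift (k : Nat) (r : Int) :
    (List.range (k + 1)).map (fun i : Nat => r + (i : Int) + 1)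
      = (r + 1) :: (List.range k).map (fun i : Nat => (r + 1) + (i : Int) + 1) := by
  rw [List.range_succ_eq_map, List.map_cons, List.map_map]
  refine List.cons_eq_cons.mpr ⟨by norm_num, ?_⟩
  apply List.map_congr_left
  intro i _
  simp [Function.comp]
  ring

theorem pvSegs_nil : pvSegs [] = [] := by rw [pvSegs]

theorem pvSegs_cons (c : Char) (cs : List Char) :
    pvSegs (c :: cs)
      = (List.range (pvRunLen c cs + 1)).map (fun i : Nat => (i : Int) + 1)
          ++ pvSegs (cs.drop (pvRunLen c cs)) := by
  rw [pvSegs.eq_def]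

theorem pvRange_one (k : Nat) :
    (List.range (k + 1)).map (fun i : Nat => (i : Int) + 1)
      = 1 :: (List.range k).map (fun i : Nat => 1 + (i : Int) + 1) := by
  rw [List.range_succ_eq_map, List.map_cons, List.map_map]
  refine List.cons_eq_cons.mpr ⟨by norm_num, ?_⟩
  apply List.map_congr_left
  intro i _
  simp [Function.comp]
  ring

-- main run lemma: continuing A from (some c, r) numbers the rest of c's run r+1, r+2, …
theorem pvANums_run : ∀ (cs : List Char) (c : Char) (r : Int),
    pvANums (some c) r cs
      = (List.range (pvRunLen c cs)).map (fun i : Nat => r + (i : Int) + 1) ++ pvSegs (cs.drop (pvRunLen c cs))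
  | [], _, _ => by simp [pvANums, pvRunLen, pvSegs_nil]
  | s :: cs, c, r => by
      by_cases h : c < s
      · have hk : pvRunLen c (s :: cs) = 1 + pvRunLen s cs := by simp [pvRunLen, h]
        have hge : ¬ (c ≥ s) := not_le.mpr h
        simp only [pvANums, hk, if_neg hge]
        rw [pvANums_run cs s (r + 1)]
        have : 1 + pvRunLen s cs = pvRunLen s cs + 1 := by omega
        rw [this, pvRange_succ_shift (pvRunLen s cs) r]
        simp [List.drop_succ_cons]
      · have hge : c ≥ s := not_lt.mp h
        have hk : pvRunLen c (s :: cs) = 0 := by simp [pvRunLen, h]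
        simp only [pvANums, hk, if_pos hge, List.drop_zero]
        rw [pvANums_run cs s 1, pvSegs_cons, pvRange_one]
        simp

theorem pvANums_eq_segs (cs : List Char) : pvANums none 0 cs = pvSegs cs := by
  cases cs with
  | nil => simp [pvANums, pvSegs_nil]
  | cons s cs =>
      simp only [pvANums]
      rw [pvANums_run cs s 1, pvSegs_cons, pvRange_one]
      simp

-- ===== VERDICT (by name: the statement is the Claim_ definition above) =====
theorem increase_subs_spec : Claim_equal_increase_subs := by
  intro S N _
  simp only [Spec_increase_subs, increase_subs, increase_subs_alt]
  rw [pvFoldl_bridge, pvANums_eq_segs]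
  simp
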